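-- pv_equiv track=rewrite | github.com/bruno00o/slitherlink-python | slitherlink.py | indices_satisfaits
-- ===== SOURCE A (Python) =====
-- def statut_case(indices, etat, case):
--     """
--     Retourne le statut de la case passée en paramètre. 0 si l'indice est
--     satisfait, -1 et 1 si il ne l'est pas, pas assez ou trop de segments
--     autour
--
--     :param indices: list
--     :param etat: dict
--     :param case: tuple
--
--     >>> indices = [[None, 3, 1]]
--     >>> etat = {((0, 1), (0, 2)): 1, ((0, 2), (0, 3)): 1, ((0, 3), (1, 3)): 1}
--     >>> statut_case(indices, etat, (0, 1))
--     -1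
--     >>> statut_case(indices, etat, (0, 2))
--     1
--     >>> etat = {((0, 1), (0, 2)): 1, ((0, 2), (0, 3)): 1}
--     >>> statut_case(indices, etat, (0, 2))
--     0
--     """
--     x, y = case
--     if indices[x][y] is None:
--         return None
--     else:
--         liste_segments = [(case, (x, y+1)), (case, (x+1, y)),
--                           ((x+1, y), (x+1, y+1)), ((x, y+1), (x+1, y+1))]
--         nombre_segments = 0
--
--         for segment in etat:
--             if segment in liste_segments and etat[segment] == 1:
--                 nombre_segments += 1
--         if int(indices[x][y]) == nombre_segments:
--             return 0
--         elif int(indices[x][y]) < nombre_segments: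
--             return 1
--         elif int(indices[x][y]) > nombre_segments:
--             return -1
--
-- def indices_satisfaits(indices, etat):
--     """
--     Renvoie True si tous les indices sont satisfaits, False sinon
--
--     :param indices: list
--     :param etat: dict
--
--     >>> indices = [[2, 1]]
--     >>> etat = {((0, 0), (0, 1)): 1, ((0, 1), (1, 1)): 1}
--     >>> indices_satisfaits(indices, etat)
--     True
--     >>> etat = {((0, 0), (0, 1)): 1, ((0, 1), (0, 2)): 1}
--     >>> indices_satisfaits(indices, etat)
--     False
--     """
--     indice = []
--     for i in range(len(indices)):
--         for j in range(len(indices[i])):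
--             if indices[i][j] is not None:
--                 case = (i, j)
--                 indice.append(statut_case(indices, etat, case))
--     for elem in indice:
--         if elem != 0:
--             return False
--     return True
-- ===== SOURCE B (Python) =====
-- def indices_satisfaits(indices, etat):
--     # One pass over etat: each lit segment increments the count of the (at most
--     # two) cells it borders; then one pass over the grid comparing clues.
--     counts = {}
--     for ((r, c), (r2, c2)), v in etat.items():
--         if v == 1:
--             if (r2, c2) == (r, c + 1):        # horizontal: top of (r,c), bottom of (r-1,c)
--                 cells = ((r, c), (r - 1, c))
--             elif (r2, c2) == (r + 1, c):      # vertical: left of (r,c), right of (r,c-1)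
--                 cells = ((r, c), (r, c - 1))
--             else:
--                 cells = ()
--             for cell in cells:
--                 counts[cell] = counts.get(cell, 0) + 1
--     for i, row in enumerate(indices):
--         for j, clue in enumerate(row):
--             if clue is not None and int(clue) != counts.get((i, j), 0):
--                 return False
--     return True
-- ===== Notes on version B (the rewrite author's own statement) =====
-- stated objective: faster
-- what changed: A scans the whole etat dict once per clued cell (testing each segment against the cell's four border segments); B inverts the loops: one pass over etat classifies each lit segment and increments a counts dict for the two cells it borders, then one pass over the grid compares each clue to counts.get((i,j),0).
import Mathlib
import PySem

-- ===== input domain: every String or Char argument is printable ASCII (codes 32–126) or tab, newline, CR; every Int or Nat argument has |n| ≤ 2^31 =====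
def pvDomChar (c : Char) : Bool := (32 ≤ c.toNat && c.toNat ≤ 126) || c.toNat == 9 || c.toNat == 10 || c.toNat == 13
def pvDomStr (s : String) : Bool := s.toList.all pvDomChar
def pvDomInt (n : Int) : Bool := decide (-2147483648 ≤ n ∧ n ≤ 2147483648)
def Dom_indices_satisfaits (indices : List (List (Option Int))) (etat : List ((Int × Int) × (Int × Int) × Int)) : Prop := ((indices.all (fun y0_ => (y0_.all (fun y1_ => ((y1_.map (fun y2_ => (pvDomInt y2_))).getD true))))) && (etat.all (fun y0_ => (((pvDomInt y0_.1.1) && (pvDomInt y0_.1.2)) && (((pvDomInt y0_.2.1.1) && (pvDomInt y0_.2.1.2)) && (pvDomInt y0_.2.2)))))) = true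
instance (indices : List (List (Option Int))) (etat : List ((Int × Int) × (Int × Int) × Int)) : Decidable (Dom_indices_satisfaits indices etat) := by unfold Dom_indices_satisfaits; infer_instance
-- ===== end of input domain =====

-- B replaces A's per-cell scan of the whole etat dict by a single pass over etat that
-- indexes segment counts per bordering cell, then one comparison pass over the grid.
-- Equivalence is proved on etat association lists with pairwise-distinct segment keys
-- (the only lists that represent a Python dict).

-- ===== PORT A =====

-- etat[segment]: first-match lookup in the association list (dict lookup, ported by
-- hand because the key is the nested pair (e.1, e.2.1); exact for Python dicts).
def etatGet? (etat : List ((Int × Int) × (Int × Int) × Int)) (k : (Int × Int) × (Int × Int)) : Option Int :=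
  (etat.find? (fun e => ((e.1, e.2.1) : (Int × Int) × (Int × Int)) == k)).map (fun e => e.2.2)

-- statut_case; indices[x][y] via pyGetD (always in range at the call sites below)
def statutCase (indices : List (List (Option Int))) (etat : List ((Int × Int) × (Int × Int) × Int)) («case» : Int × Int) : Option Int :=
  let x := «case».1
  let y := «case».2
  match PySem.List.pyGetD (PySem.List.pyGetD indices x []) y none with
  | none => none
  | some v =>
      let liste_segments : List ((Int × Int) × (Int × Int)) :=
        [(«case», (x, y+1)), («case», (x+1, y)), ((x+1, y), (x+1, y+1)), ((x, y+1), (x+1, y+1))]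
      let nombre_segments : Int := etat.foldl (fun acc seg =>
        if ((seg.1, seg.2.1) : (Int × Int) × (Int × Int)) ∈ liste_segments ∧ etatGet? etat (seg.1, seg.2.1) = some 1
        then acc + 1 else acc) 0
      if v == nombre_segments then some 0
      else if v < nombre_segments then some 1
      else some (-1)

def indices_satisfaits (indices : List (List (Option Int))) (etat : List ((Int × Int) × (Int × Int) × Int)) : Bool :=
  let indice : List (Option Int) :=
    (PySem.List.pyRange 0 (indices.length : Int) 1).foldl (fun acc i =>
      (PySem.List.pyRange 0 ((PySem.List.pyGetD indices i []).length : Int) 1).foldl (fun acc2 j =>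
        if PySem.List.pyGetD (PySem.List.pyGetD indices i []) j none ≠ none
        then acc2 ++ [statutCase indices etat (i, j)] else acc2) acc) []
  indice.all (fun e => e == some 0)

-- ===== PORT B =====

-- the (at most two) cells bordering a lit segment, in Source B's order
def cellsB (e : (Int × Int) × (Int × Int) × Int) : List (Int × Int) :=
  if e.2.2 == 1 then
    if ((e.2.1.1, e.2.1.2) : Int × Int) == (e.1.1, e.1.2 + 1) then [(e.1.1, e.1.2), (e.1.1 - 1, e.1.2)]
    else if ((e.2.1.1, e.2.1.2) : Int × Int) == (e.1.1 + 1, e.1.2) then [(e.1.1, e.1.2), (e.1.1, e.1.2 - 1)]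
    else []
  else []

def indices_satisfaits_alt (indices : List (List (Option Int))) (etat : List ((Int × Int) × (Int × Int) × Int)) : Bool :=
  let counts : PySem.Dict (Int × Int) Int :=
    etat.foldl (fun d e => (cellsB e).foldl (fun d cell => d.insert cell (d.getD cell 0 + 1)) d) PySem.Dict.empty
  (PySem.List.enumerate indices 0).all (fun p =>
    (PySem.List.enumerate p.2 0).all (fun q =>
      match q.2 with
      | none => true
      | some v => v == counts.getD (p.1, q.1) 0))

-- ===== PRECONDITION & SPEC =====
-- Pre_ excludes only association lists whose segment keys repeat: those do not represent
-- a Python dict (dict keys are unique), so A's first-match lookup has no counterpart.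
def Pre_indices_satisfaits (indices : List (List (Option Int))) (etat : List ((Int × Int) × (Int × Int) × Int)) : Prop :=
  (etat.map (fun e => ((e.1, e.2.1) : (Int × Int) × (Int × Int)))).Nodup
instance (indices : List (List (Option Int))) (etat : List ((Int × Int) × (Int × Int) × Int)) : Decidable (Pre_indices_satisfaits indices etat) := by unfold Pre_indices_satisfaits; infer_instance

def pvWitness_indices_satisfaits : List (List (Option Int)) × (List ((Int × Int) × (Int × Int) × Int)) :=
  ([[some 2, some 1]], [((0, 0), (0, 1), 1), ((0, 1), (1, 1), 1)])

def Spec_indices_satisfaits (indices : List (List (Option Int))) (etat : List ((Int × Int) × (Int × Int) × Int)) (out : Bool) : Prop := out = indices_satisfaits_alt indices etat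
instance (indices : List (List (Option Int))) (etat : List ((Int × Int) × (Int × Int) × Int)) (out : Bool) : Decidable (Spec_indices_satisfaits indices etat out) := by unfold Spec_indices_satisfaits; infer_instance

-- ===== CLAIM (what is proved, stated in full; the proofs are below) =====
def Claim_equal_indices_satisfaits : Prop := ∀ (indices : List (List (Option Int))) (etat : List ((Int × Int) × (Int × Int) × Int)), Dom_indices_satisfaits indices etat → Pre_indices_satisfaits indices etat → Spec_indices_satisfaits indices etat (indices_satisfaits indices etat)

-- ===== LEMMAS AND PROOFS =====

-- counting fold = countP
theorem foldl_if_count {α : Type} (p : α → Prop) [DecidablePred p] :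
    ∀ (l : List α) (n : Int), l.foldl (fun acc x => if p x then acc + 1 else acc) n
      = n + (l.countP (fun x => decide (p x)) : Nat) := by
  intro l
  induction l with
  | nil => simp
  | cons a l ih =>
      intro n
      simp only [List.foldl_cons, List.countP_cons, ih]
      by_cases h : p a <;> simp [h] <;> omega

-- append-building fold = flatMap
theorem foldl_if_append {α β : Type} (p : α → Prop) [DecidablePred p] (g : α → β) :
    ∀ (l : List α) (a : List β), l.foldl (fun acc x => if p x then acc ++ [g x] else acc) a
      = a ++ l.flatMap (fun x => if p x then [g x] else []) := by
  intro l
  induction l with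
  | nil => simp
  | cons x l ih =>
      intro a
      by_cases h : p x <;> simp [h, ih]

-- nested fold = fold over flatMap
theorem foldl_foldl_flatMap {α β γ : Type} (f : α → List β) (step : γ → β → γ) :
    ∀ (l : List α) (d : γ), l.foldl (fun d e => (f e).foldl step d) d = (l.flatMap f).foldl step d := by
  intro l
  induction l with
  | nil => simp
  | cons x l ih => intro d; simp [ih, List.foldl_append]

theorem cellsB_nodup (e : (Int × Int) × (Int × Int) × Int) : (cellsB e).Nodup := by
  obtain ⟨⟨r, c⟩, ⟨r2, c2⟩, v⟩ := e
  simp only [cellsB]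
  split_ifs <;> simp <;> omega

theorem count_flatMap_cellsB (c : Int × Int) :
    ∀ (l : List ((Int × Int) × (Int × Int) × Int)),
      (l.flatMap cellsB).count c = l.countP (fun e => decide (c ∈ cellsB e)) := by
  intro l
  induction l with
  | nil => simp
  | cons e l ih =>
      simp only [List.flatMap_cons, List.count_append, List.countP_cons, ih]
      by_cases h : c ∈ cellsB e
      · rw [List.count_eq_one_of_mem (cellsB_nodup e) h]; simp [h]; omega
      · rw [List.count_eq_zero_of_not_mem h]; simp [h]

-- geometry: a segment key belongs to cell (i,j)'s four segments (with value 1) iff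
-- B classifies it as bordering (i,j)
theorem geom (i j : Int) (e : (Int × Int) × (Int × Int) × Int) :
    (((e.1, e.2.1) : (Int × Int) × (Int × Int)) ∈
        ([(((i, j) : Int × Int), ((i, j+1) : Int × Int)), ((i, j), (i+1, j)), ((i+1, j), (i+1, j+1)), ((i, j+1), (i+1, j+1))] : List ((Int × Int) × (Int × Int)))
      ∧ e.2.2 = 1) ↔ (i, j) ∈ cellsB e := by
  obtain ⟨⟨r, c⟩, ⟨r2, c2⟩, v⟩ := e
  simp only [cellsB, List.mem_cons, List.not_mem_nil, Prod.mk.injEq, beq_iff_eq]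
  split_ifs with h1 h2 h3 <;> simp_all <;> omega

-- first-match lookup on a nodup-keyed list returns the entry's own value
theorem etatGet?_mem (etat : List ((Int × Int) × (Int × Int) × Int))
    (h : (etat.map (fun e => ((e.1, e.2.1) : (Int × Int) × (Int × Int)))).Nodup)
    (e : (Int × Int) × (Int × Int) × Int) (he : e ∈ etat) :
    etatGet? etat (e.1, e.2.1) = some e.2.2 := by
  induction etat with
  | nil => cases he
  | cons a l ih =>
      simp only [List.map_cons, List.nodup_cons] at h
      rcases List.mem_cons.1 he with rfl | he'
      · simp [etatGet?]
      · have hne : ((a.1, a.2.1) : (Int × Int) × (Int × Int)) ≠ (e.1, e.2.1) := by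
          intro hq
          exact h.1 (hq ▸ List.mem_map_of_mem he')
        have hb : (((a.1, a.2.1) : (Int × Int) × (Int × Int)) == (e.1, e.2.1)) = false := by
          simpa using hne
        simp only [etatGet?] at ih ⊢
        rw [List.find?_cons_of_neg (by simp [hb])]
        exact ih h.2 he'

-- B's counts dict at a cell = count of lit segments bordering it
theorem countsB_getD (etat : List ((Int × Int) × (Int × Int) × Int)) (ij : Int × Int) :
    (etat.foldl (fun d e => (cellsB e).foldl (fun d cell => d.insert cell (d.getD cell 0 + 1)) d)
      (PySem.Dict.empty : PySem.Dict (Int × Int) Int)).getD ij 0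
      = (etat.countP (fun e => decide (ij ∈ cellsB e)) : Nat) := by
  rw [foldl_foldl_flatMap, PySem.Dict.getD_foldl_insert_add_one, count_flatMap_cellsB]
  simp

-- A's per-cell segment count equals B's indexed count, under nodup keys
theorem nombre_eq (etat : List ((Int × Int) × (Int × Int) × Int))
    (h : (etat.map (fun e => ((e.1, e.2.1) : (Int × Int) × (Int × Int)))).Nodup) (i j : Int) :
    etat.foldl (fun acc seg =>
      if ((seg.1, seg.2.1) : (Int × Int) × (Int × Int)) ∈
          ([(((i, j) : Int × Int), ((i, j+1) : Int × Int)), ((i, j), (i+1, j)), ((i+1, j), (i+1, j+1)), ((i, j+1), (i+1, j+1))] : List ((Int × Int) × (Int × Int)))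
        ∧ etatGet? etat (seg.1, seg.2.1) = some 1
      then acc + 1 else acc) 0
    = (etat.foldl (fun d e => (cellsB e).foldl (fun d cell => d.insert cell (d.getD cell 0 + 1)) d)
        (PySem.Dict.empty : PySem.Dict (Int × Int) Int)).getD (i, j) 0 := by
  rw [foldl_if_count, countsB_getD]
  have hc : List.countP (fun e => decide (((e.1, e.2.1) : (Int × Int) × (Int × Int)) ∈
        ([(((i, j) : Int × Int), ((i, j+1) : Int × Int)), ((i, j), (i+1, j)), ((i+1, j), (i+1, j+1)), ((i, j+1), (i+1, j+1))] : List ((Int × Int) × (Int × Int)))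
      ∧ etatGet? etat (e.1, e.2.1) = some 1)) etat
      = List.countP (fun e => decide ((i, j) ∈ cellsB e)) etat := by
    apply List.countP_congr
    intro e he
    rw [etatGet?_mem etat h e he]
    simpa using geom i j e
  rw [hc]
  simp

theorem all_ite_singleton {α : Type} (p : Prop) [Decidable p] (x : α) (q : α → Bool) :
    (if p then [x] else []).all q = (if p then q x else true) := by
  split <;> simp

theorem A_eq (indices : List (List (Option Int))) (etat : List ((Int × Int) × (Int × Int) × Int)) :
    indices_satisfaits indices etat =
      (PySem.List.pyRange 0 (indices.length : Int) 1).all (fun i =>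
        (PySem.List.pyRange 0 ((PySem.List.pyGetD indices i []).length : Int) 1).all (fun j =>
          if PySem.List.pyGetD (PySem.List.pyGetD indices i []) j none ≠ none
          then statutCase indices etat (i, j) == some 0 else true)) := by
  unfold indices_satisfaits
  simp only [foldl_if_append, PySem.List.foldl_append_eq_flatMap, List.nil_append,
    List.all_flatMap, all_ite_singleton]

theorem B_eq (indices : List (List (Option Int))) (etat : List ((Int × Int) × (Int × Int) × Int)) :
    indices_satisfaits_alt indices etat =
      (PySem.List.pyRange 0 (indices.length : Int) 1).all (fun i =>
        (PySem.List.pyRange 0 ((PySem.List.pyGetD indices i []).length : Int) 1).all (fun j =>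
          match PySem.List.pyGetD (PySem.List.pyGetD indices i []) j none with
          | none => true
          | some v => v ==
              (etat.foldl (fun d e => (cellsB e).foldl (fun d cell => d.insert cell (d.getD cell 0 + 1)) d)
                (PySem.Dict.empty : PySem.Dict (Int × Int) Int)).getD (i, j) 0)) := by
  unfold indices_satisfaits_alt
  rw [PySem.List.enumerate_eq_map_pyRange indices ([] : List (Option Int)), List.all_map]
  simp only [fun (xs : List (Option Int)) => PySem.List.enumerate_eq_map_pyRange xs (none : Option Int),
    List.all_map]
  simp only [Function.comp_def, PySem.List.len_eq]

-- ===== VERDICT (by name: the statement is the Claim_ definition above) =====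
theorem indices_satisfaits_spec : Claim_equal_indices_satisfaits := by
  intro indices etat _ hpre
  show _ = _
  rw [A_eq, B_eq]
  congr 1
  funext i
  congr 1
  funext j
  cases h : PySem.List.pyGetD (PySem.List.pyGetD indices i []) j none with
  | none => simp
  | some v =>
      simp only [ne_eq, reduceCtorEq, not_false_eq_true, if_pos]
      unfold statutCase
      simp only [h]
      rw [nombre_eq etat hpre i j]
      by_cases hv : v = (etat.foldl (fun d e => (cellsB e).foldl (fun d cell => d.insert cell (d.getD cell 0 + 1)) d)
          (PySem.Dict.empty : PySem.Dict (Int × Int) Int)).getD (i, j) 0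
      · simp [hv]
      · simp only [beq_iff_eq, hv]
        split
        · simp_all
        · split <;> simp [hv]
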